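-- pv_equiv track=rewrite | github.com/eazyy332/xbrl-validator | xbrl_validator/dpm.py | find_entry_for_template_in_package
-- ===== SOURCE A (Python) =====
-- from typing import List, Optional, Tuple
--
-- def find_entry_for_template_in_package(package_zip_path: str, template_code: str, entries: List[Tuple[str, str]]) -> Optional[Tuple[str, str]]:
--     # entries: list of (label, entry_uri)
--     lc = template_code.lower()
--     # Prefer label match
--     for label, uri in entries:
--         if lc in (label or "").lower():
--             return label, uri
--     # Fallback: uri contains code
--     for label, uri in entries:
--         if lc in (uri or "").lower():
--             return label, uri
--     return None
-- ===== SOURCE B (Python) =====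
-- def find_entry_for_template_in_package(package_zip_path, template_code, entries):
--     # Single pass: return immediately on first label match, remembering the
--     # first uri match as a fallback (label precedence preserved).
--     lc = template_code.lower()
--     fallback = None
--     for label, uri in entries:
--         if lc in (label or "").lower():
--             return label, uri
--         if fallback is None and lc in (uri or "").lower():
--             fallback = (label, uri)
--     return fallback
-- ===== Notes on version B (the rewrite author's own statement) =====
-- stated objective: alternative
-- what changed: Replaced A's two sequential scans (label pass, then uri pass) by a single pass that returns on the first label match and records the first uri match in a fallback variable returned at the end.
import Mathlib
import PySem

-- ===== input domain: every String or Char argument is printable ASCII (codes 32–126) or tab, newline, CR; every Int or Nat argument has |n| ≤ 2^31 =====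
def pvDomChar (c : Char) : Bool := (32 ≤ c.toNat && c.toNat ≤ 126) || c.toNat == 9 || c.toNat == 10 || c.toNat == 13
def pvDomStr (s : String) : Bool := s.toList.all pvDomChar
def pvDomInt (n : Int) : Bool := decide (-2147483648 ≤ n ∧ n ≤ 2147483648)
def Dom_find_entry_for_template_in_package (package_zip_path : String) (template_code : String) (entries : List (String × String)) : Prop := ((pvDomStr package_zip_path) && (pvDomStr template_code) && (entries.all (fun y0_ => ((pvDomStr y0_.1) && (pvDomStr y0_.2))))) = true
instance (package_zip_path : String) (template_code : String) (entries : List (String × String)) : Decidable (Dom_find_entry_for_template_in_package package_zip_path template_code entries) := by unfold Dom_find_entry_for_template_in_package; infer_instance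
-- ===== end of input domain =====

-- ===== PORT A =====
-- Header: B merges A's two priority scans into one pass with a fallback variable (alternative decomposition, same result).
-- first loop of A: first entry whose (lowercased) label contains lc
def pvScanLabel (lc : String) : List (String × String) → Option (String × String)
  | [] => none
  | (label, uri) :: t =>
    if PySem.Str.isIn lc (PySem.Str.lower label) then some (label, uri)
    else pvScanLabel lc t

-- second loop of A: first entry whose (lowercased) uri contains lc
def pvScanUri (lc : String) : List (String × String) → Option (String × String)
  | [] => none
  | (label, uri) :: t =>
    if PySem.Str.isIn lc (PySem.Str.lower uri) then some (label, uri)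
    else pvScanUri lc t

def find_entry_for_template_in_package (package_zip_path : String) (template_code : String) (entries : List (String × String)) : Option (String × String) :=
  let lc := PySem.Str.lower template_code
  match pvScanLabel lc entries with
  | some r => some r
  | none =>
    match pvScanUri lc entries with
    | some r => some r
    | none => none

-- ===== PORT B =====
-- B's single loop: immediate return on a label match; first uri match kept in `fallback`
def pvGoB (lc : String) (fallback : Option (String × String)) : List (String × String) → Option (String × String)
  | [] => fallback
  | (label, uri) :: t =>
    if PySem.Str.isIn lc (PySem.Str.lower label) then some (label, uri)
    else
      pvGoB lc
        (if fallback.isNone && PySem.Str.isIn lc (PySem.Str.lower uri) then some (label, uri)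
         else fallback) t

def find_entry_for_template_in_package_alt (package_zip_path : String) (template_code : String) (entries : List (String × String)) : Option (String × String) :=
  pvGoB (PySem.Str.lower template_code) none entries

-- ===== PRECONDITION & SPEC =====
def Spec_find_entry_for_template_in_package (package_zip_path : String) (template_code : String) (entries : List (String × String)) (out : Option (String × String)) : Prop := out = find_entry_for_template_in_package_alt package_zip_path template_code entries
instance (package_zip_path : String) (template_code : String) (entries : List (String × String)) (out : Option (String × String)) : Decidable (Spec_find_entry_for_template_in_package package_zip_path template_code entries out) := by unfold Spec_find_entry_for_template_in_package; infer_instance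

-- ===== CLAIM (what is proved, stated in full; the proofs are below) =====
def Claim_equal_find_entry_for_template_in_package : Prop := ∀ (package_zip_path : String) (template_code : String) (entries : List (String × String)), Dom_find_entry_for_template_in_package package_zip_path template_code entries → Spec_find_entry_for_template_in_package package_zip_path template_code entries (find_entry_for_template_in_package package_zip_path template_code entries)

-- ===== LEMMAS AND PROOFS =====

theorem pvGoB_eq (lc : String) (entries : List (String × String)) :
    ∀ fb : Option (String × String),
      pvGoB lc fb entries = ((pvScanLabel lc entries).or (fb.or (pvScanUri lc entries))) := by
  induction entries with
  | nil => intro fb; simp [pvGoB, pvScanLabel, pvScanUri]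
  | cons x t ih =>
    intro fb
    obtain ⟨label, uri⟩ := x
    by_cases hl : PySem.Chars.isIn lc.toList (PySem.Chars.lower label.toList) = true
    · simp [pvGoB, pvScanLabel, hl]
    · cases fb with
      | some r => simp [pvGoB, pvScanLabel, pvScanUri, hl, ih, Option.or]
      | none =>
        by_cases hu : PySem.Chars.isIn lc.toList (PySem.Chars.lower uri.toList) = true
        · simp [pvGoB, pvScanLabel, pvScanUri, hl, hu, ih, Option.or]
        · simp [pvGoB, pvScanLabel, pvScanUri, hl, hu, ih]

-- ===== VERDICT (by name: the statement is the Claim_ definition above) =====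
theorem find_entry_for_template_in_package_spec : Claim_equal_find_entry_for_template_in_package := by
  intro p tc entries _
  unfold Spec_find_entry_for_template_in_package find_entry_for_template_in_package find_entry_for_template_in_package_alt
  rw [pvGoB_eq]
  cases h1 : pvScanLabel (PySem.Str.lower tc) entries <;>
    cases h2 : pvScanUri (PySem.Str.lower tc) entries <;> simp [h1, h2, Option.or]
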